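-- pv_equiv track=rewrite | github.com/carlacupcake/hashin_shtrikman_mp | src/hashin_shtrikman_mp/core/genetic_algorithm/optimization_params.py | get_elastic_idx_from_user_input
-- ===== SOURCE A (Python) =====
-- def get_elastic_idx_from_user_input(upper_bounds:        dict,
--                                     property_categories: list[str]) -> list[int]:
--     """
--     Gets the indices of elastic properties from the upper bounds.
--
--     Args:
--         upper_bounds (dict)
--         property_categories (list[str])
--
--     Returns:
--         indices (list[int]): ensures proper ordering of elastic moduli
--     """
--
--     idx = 0
--     indices = [None, None]
--     for material in upper_bounds:
--         if material != "volume-fractions":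
--             for category, properties in upper_bounds[material].items():
--                 if category in property_categories:
--                     for _ in properties:
--                         if category == "elastic":
--                             return [idx, idx+1]
--                         idx += 1
--
--     return indices
-- ===== SOURCE B (Python) =====
-- def get_elastic_idx_from_user_input(upper_bounds:        dict,
--                                     property_categories: list[str]) -> list[int]:
--     """Prefix-sum over per-category property counts: aggregate each counted
--     category to (name, len(properties)), build a starts table of prefix sums,
--     and return the start of the first nonempty 'elastic' category."""
--     counts = [(category, len(properties))
--               for material, categories in upper_bounds.items()
--               if material != "volume-fractions"
--               for category, properties in categories.items()
--               if category in property_categories]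
--     starts = [0]
--     for _, cnt in counts:
--         starts.append(starts[-1] + cnt)
--     for (category, cnt), start in zip(counts, starts):
--         if category == "elastic" and cnt > 0:
--             return [start, start + 1]
--     return [None, None]
-- ===== Notes on version B (the rewrite author's own statement) =====
-- stated objective: alternative
-- what changed: Replaces A's per-property counting loop with early return by an aggregate-then-arithmetic scheme: each counted category is collapsed to (name, len(properties)), a prefix-sum starts table is built over these counts, and the answer is the start of the first nonempty 'elastic' entry; no per-property iteration occurs.
import Mathlib
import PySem

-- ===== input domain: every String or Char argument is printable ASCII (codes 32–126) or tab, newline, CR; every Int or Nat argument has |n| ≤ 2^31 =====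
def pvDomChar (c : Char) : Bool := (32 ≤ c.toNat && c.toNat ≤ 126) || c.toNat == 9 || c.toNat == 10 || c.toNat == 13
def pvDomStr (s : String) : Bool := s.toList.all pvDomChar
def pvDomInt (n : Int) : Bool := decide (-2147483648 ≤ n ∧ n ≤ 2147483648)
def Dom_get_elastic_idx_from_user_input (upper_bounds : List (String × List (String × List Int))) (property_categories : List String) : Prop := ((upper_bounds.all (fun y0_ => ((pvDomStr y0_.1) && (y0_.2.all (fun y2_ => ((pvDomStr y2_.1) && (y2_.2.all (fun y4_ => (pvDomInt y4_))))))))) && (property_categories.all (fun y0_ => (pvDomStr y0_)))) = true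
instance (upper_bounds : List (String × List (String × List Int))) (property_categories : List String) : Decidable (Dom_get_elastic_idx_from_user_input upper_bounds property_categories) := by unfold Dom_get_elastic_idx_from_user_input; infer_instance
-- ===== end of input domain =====

-- ===== PORT A =====
-- B replaces A's per-property counting loop by an aggregate-then-arithmetic scheme:
-- per-category (name, count) pairs, a prefix-sum starts table, and a scan for the
-- first nonempty 'elastic' entry. Objective: alternative (same cost).

-- inner `for _ in properties` loop of A: early return or advance the counter
def pvA_props : List Int → String → Int → Option (List (Option Int)) × Int
  | [], _, idx => (none, idx)
  | _ :: rest, category, idx =>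
    if category == "elastic" then (some [some idx, some (idx + 1)], idx)
    else pvA_props rest category (idx + 1)

-- middle loop over `upper_bounds[material].items()`
def pvA_cats : List (String × List Int) → List String → Int → Option (List (Option Int)) × Int
  | [], _, idx => (none, idx)
  | (category, properties) :: rest, pcs, idx =>
    if pcs.contains category then
      match pvA_props properties category idx with
      | (some r, i) => (some r, i)
      | (none, idx') => pvA_cats rest pcs idx'
    else pvA_cats rest pcs idx

-- outer loop over materials
def pvA_loop : List (String × List (String × List Int)) → List String → Int → List (Option Int)
  | [], _, _ => [none, none]
  | (material, cats) :: rest, pcs, idx =>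
    if material != "volume-fractions" then
      match pvA_cats cats pcs idx with
      | (some r, _) => r
      | (none, idx') => pvA_loop rest pcs idx'
    else pvA_loop rest pcs idx

def get_elastic_idx_from_user_input (upper_bounds : List (String × List (String × List Int))) (property_categories : List String) : List (Option Int) :=
  pvA_loop upper_bounds property_categories 0

-- ===== PORT B =====
-- Source B's `counts` comprehension: one (category, len(properties)) pair per counted category
def pvB_counts (upper_bounds : List (String × List (String × List Int))) (property_categories : List String) : List (String × Int) :=
  (upper_bounds.filter (fun m => m.1 != "volume-fractions")).flatMap (fun m =>
    (m.2.filter (fun c => property_categories.contains c.1)).map (fun c => (c.1, (c.2.length : Int))))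

-- Source B's `starts` loop: starts = [0]; for _, cnt in counts: starts.append(starts[-1] + cnt)
def pvB_starts (counts : List (String × Int)) : List Int :=
  counts.foldl (fun acc c => acc ++ [acc.getLastD 0 + c.2]) [0]

-- Source B's final `for (category, cnt), start in zip(counts, starts)` scan
def pvB_scan : List ((String × Int) × Int) → List (Option Int)
  | [] => [none, none]
  | (c, s) :: rest =>
    if c.1 == "elastic" && decide (0 < c.2) then [some s, some (s + 1)]
    else pvB_scan rest

def get_elastic_idx_from_user_input_alt (upper_bounds : List (String × List (String × List Int))) (property_categories : List String) : List (Option Int) :=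
  let counts := pvB_counts upper_bounds property_categories
  pvB_scan (counts.zip (pvB_starts counts))

-- ===== PRECONDITION & SPEC =====
def Spec_get_elastic_idx_from_user_input (upper_bounds : List (String × List (String × List Int))) (property_categories : List String) (out : List (Option Int)) : Prop := out = get_elastic_idx_from_user_input_alt upper_bounds property_categories
instance (upper_bounds : List (String × List (String × List Int))) (property_categories : List String) (out : List (Option Int)) : Decidable (Spec_get_elastic_idx_from_user_input upper_bounds property_categories out) := by unfold Spec_get_elastic_idx_from_user_input; infer_instance

-- ===== CLAIM (what is proved, stated in full; the proofs are below) =====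
def Claim_equal_get_elastic_idx_from_user_input : Prop := ∀ (upper_bounds : List (String × List (String × List Int))) (property_categories : List String), Dom_get_elastic_idx_from_user_input upper_bounds property_categories → Spec_get_elastic_idx_from_user_input upper_bounds property_categories (get_elastic_idx_from_user_input upper_bounds property_categories)

-- ===== LEMMAS AND PROOFS =====

-- offset of the first nonempty 'elastic' entry in a counts list, starting from `off`
def pvScanOff : List (String × Int) → Int → Option Int
  | [], _ => none
  | c :: rest, off =>
    if c.1 == "elastic" && decide (0 < c.2) then some off
    else pvScanOff rest (off + c.2)

def pvTail : Int → List (String × Int) → List Int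
  | _, [] => []
  | o, c :: r => (o + c.2) :: pvTail (o + c.2) r

def pvTotal (cs : List (String × Int)) : Int := (cs.map (·.2)).sum

def pvCatCounts (cats : List (String × List Int)) (pcs : List String) : List (String × Int) :=
  (cats.filter (fun c => pcs.contains c.1)).map (fun c => (c.1, (c.2.length : Int)))

theorem pvB_starts_aux (cs : List (String × Int)) (acc : List Int) (h : acc ≠ []) :
    cs.foldl (fun acc c => acc ++ [acc.getLastD 0 + c.2]) acc
      = acc ++ pvTail (acc.getLastD 0) cs := by
  induction cs generalizing acc with
  | nil => simp [pvTail]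
  | cons c r ih =>
    simp only [List.foldl_cons]
    rw [ih _ (by simp)]
    have hlast : (acc ++ [acc.getLastD 0 + c.2]).getLastD 0 = acc.getLastD 0 + c.2 := by
      simp
    rw [hlast, pvTail, List.append_assoc]
    rfl

theorem pvB_scan_eq (cs : List (String × Int)) (o : Int) :
    pvB_scan (cs.zip (o :: pvTail o cs))
      = match pvScanOff cs o with
        | some i => [some i, some (i + 1)]
        | none => [none, none] := by
  induction cs generalizing o with
  | nil => simp [pvB_scan, pvScanOff]
  | cons c r ih =>
    simp only [pvTail, List.zip_cons_cons, pvB_scan, pvScanOff]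
    by_cases h : (c.1 == "elastic" && decide (0 < c.2)) = true
    · simp [h]
    · simp only [h, Bool.false_eq_true, if_false]
      exact ih (o + c.2)

theorem pvScanOff_append (xs ys : List (String × Int)) (o : Int) :
    pvScanOff (xs ++ ys) o
      = match pvScanOff xs o with
        | some i => some i
        | none => pvScanOff ys (o + pvTotal xs) := by
  induction xs generalizing o with
  | nil => simp [pvScanOff, pvTotal]
  | cons c r ih =>
    simp only [List.cons_append, pvScanOff]
    by_cases h : (c.1 == "elastic" && decide (0 < c.2)) = true
    · simp [h]
    · simp only [h, Bool.false_eq_true, if_false, ih]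
      have : o + c.2 + pvTotal r = o + pvTotal ((c :: r)) := by
        simp [pvTotal]; ring
      rw [this]

theorem pvA_props_eq (props : List Int) (category : String) (idx : Int) :
    pvA_props props category idx
      = if (category == "elastic" && decide (0 < (props.length : Int))) = true
        then (some [some idx, some (idx + 1)], idx)
        else (none, idx + props.length) := by
  cases props with
  | nil => simp [pvA_props]
  | cons p ps =>
    by_cases he : (category == "elastic") = true
    · simp [pvA_props, he]
    · have he' : (category == "elastic") = false := by simpa using he
      simp only [he', Bool.false_and, Bool.false_eq_true, if_false]
      -- the non-elastic inner loop just advances the counter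
      suffices h : ∀ (ps : List Int) (idx : Int), pvA_props ps category idx = (none, idx + ps.length) by
        rw [h]
      intro ps
      induction ps with
      | nil => intro idx; simp [pvA_props]
      | cons q qs ih =>
        intro idx
        simp [pvA_props, he', ih]
        ring

theorem pvA_cats_eq (cats : List (String × List Int)) (pcs : List String) (idx : Int) :
    pvA_cats cats pcs idx
      = match pvScanOff (pvCatCounts cats pcs) idx with
        | some i => (some [some i, some (i + 1)], i)
        | none => (none, idx + pvTotal (pvCatCounts cats pcs)) := by
  induction cats generalizing idx with
  | nil => simp [pvA_cats, pvCatCounts, pvScanOff, pvTotal]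
  | cons c rest ih =>
    obtain ⟨category, properties⟩ := c
    by_cases hc : pcs.contains category = true
    · have hm : category ∈ pcs := by simpa using hc
      have hcc : pvCatCounts ((category, properties) :: rest) pcs
          = (category, (properties.length : Int)) :: pvCatCounts rest pcs := by
        simp [pvCatCounts, hm]
      simp only [pvA_cats, hc, if_true, pvA_props_eq, hcc, pvScanOff]
      split_ifs with h
      · rfl
      · simp only [ih]
        cases h2 : pvScanOff (pvCatCounts rest pcs) (idx + properties.length) <;>
          simp [pvTotal] <;> ring
    · have hm' : category ∉ pcs := by simpa using hc
      have hc' : pcs.contains category = false := by simpa using hc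
      have hcc : pvCatCounts ((category, properties) :: rest) pcs = pvCatCounts rest pcs := by
        simp [pvCatCounts, hm']
      simp only [pvA_cats, hc', Bool.false_eq_true, if_false, ih, hcc]
theorem pvA_loop_eq (ub : List (String × List (String × List Int))) (pcs : List String) (idx : Int) :
    pvA_loop ub pcs idx
      = match pvScanOff (pvB_counts ub pcs) idx with
        | some i => [some i, some (i + 1)]
        | none => [none, none] := by
  induction ub generalizing idx with
  | nil => simp [pvA_loop, pvB_counts, pvScanOff]
  | cons m rest ih =>
    obtain ⟨material, cats⟩ := m
    by_cases hm : (material != "volume-fractions") = true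
    · have hflat : pvB_counts ((material, cats) :: rest) pcs
          = pvCatCounts cats pcs ++ pvB_counts rest pcs := by
        simp [pvB_counts, pvCatCounts, hm]
      simp only [pvA_loop, hm, if_true, pvA_cats_eq]
      rw [hflat, pvScanOff_append]
      cases h1 : pvScanOff (pvCatCounts cats pcs) idx with
      | some i => simp
      | none => simp [ih]
    · have hm' : (material != "volume-fractions") = false := by simpa using hm
      have hflat : pvB_counts ((material, cats) :: rest) pcs = pvB_counts rest pcs := by
        simp [pvB_counts, hm']
      simp [pvA_loop, hm', ih, hflat]

-- ===== VERDICT (by name: the statement is the Claim_ definition above) =====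
theorem get_elastic_idx_from_user_input_spec : Claim_equal_get_elastic_idx_from_user_input := by
  intro ub pcs _
  unfold Spec_get_elastic_idx_from_user_input
  unfold get_elastic_idx_from_user_input get_elastic_idx_from_user_input_alt
  rw [pvA_loop_eq]
  show _ = pvB_scan ((pvB_counts ub pcs).zip (pvB_starts (pvB_counts ub pcs)))
  rw [pvB_starts, pvB_starts_aux _ _ (by simp)]
  have : ([0] : List Int) ++ pvTail (([0] : List Int).getLastD 0) (pvB_counts ub pcs)
      = 0 :: pvTail 0 (pvB_counts ub pcs) := by simp
  rw [this, pvB_scan_eq]
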